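-- pv_equiv track=rewrite | github.com/CarletonComputerScienceSociety/advent-of-code | 2020/day-06/arora-aditya/day6.py | count_for_group2
-- ===== SOURCE A (Python) =====
-- def count_for_group2(lines):
--     chars = "".join(lines)
--     ct = 0
--     for char in set(chars):
--         flag = True
--         for line in lines:
--             if char not in line:
--                 flag = False
--                 break
--         if flag:
--             ct += 1
--     return ct
-- ===== SOURCE B (Python) =====
-- def count_for_group2(lines):
--     if not lines:
--         return 0
--     common = set(lines[0])
--     for line in lines[1:]:
--         common &= set(line)
--     return len(common)
-- ===== Notes on version B (the rewrite author's own statement) =====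
-- stated objective: simpler
-- what changed: Replaces A's per-unique-character rescan of all lines with a single fold of set intersections over the lines (empty list handled first).
import Mathlib
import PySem

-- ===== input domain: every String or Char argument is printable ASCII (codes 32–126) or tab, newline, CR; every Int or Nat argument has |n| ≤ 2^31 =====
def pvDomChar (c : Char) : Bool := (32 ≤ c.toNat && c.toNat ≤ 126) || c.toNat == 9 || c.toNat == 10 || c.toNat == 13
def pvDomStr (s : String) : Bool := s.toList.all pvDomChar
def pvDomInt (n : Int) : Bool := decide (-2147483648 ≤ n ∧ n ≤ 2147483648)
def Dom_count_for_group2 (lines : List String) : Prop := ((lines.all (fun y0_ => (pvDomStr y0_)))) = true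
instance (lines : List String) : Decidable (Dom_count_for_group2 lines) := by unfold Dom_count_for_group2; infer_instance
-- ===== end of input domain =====

-- B replaces A's per-unique-character rescan of all lines with a single fold of set
-- intersections over the lines (simpler; same result, empty list handled first).

-- ===== PORT A =====
-- inner loop of A: 'for line in lines: if char not in line: flag = False; break'
def pvChk (char : Char) : List String → Bool
  | [] => true
  | l :: ls => if !(l.toList.contains char) then false else pvChk char ls

def count_for_group2 (lines : List String) : Int :=
  let chars := (lines.map String.toList).flatten   -- "".join(lines), as chars
  (PySem.Set.ofList chars).foldl
    (fun ct char => let flag := pvChk char lines; if flag then ct + 1 else ct) 0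

-- ===== PORT B =====
-- B: intersection of the character sets of all lines; 0 for the empty list
def count_for_group2_alt (lines : List String) : Int :=
  match lines with
  | [] => 0
  | h :: t =>
    (t.foldl (fun common line => PySem.Set.inter common (PySem.Set.ofList line.toList))
      (PySem.Set.ofList h.toList)).length

-- ===== PRECONDITION & SPEC =====
def Spec_count_for_group2 (lines : List String) (out : Int) : Prop := out = count_for_group2_alt lines
instance (lines : List String) (out : Int) : Decidable (Spec_count_for_group2 lines out) := by unfold Spec_count_for_group2; infer_instance

-- ===== CLAIM (what is proved, stated in full; the proofs are below) =====
def Claim_equal_count_for_group2 : Prop := ∀ (lines : List String), Dom_count_for_group2 lines → Spec_count_for_group2 lines (count_for_group2 lines)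

-- ===== LEMMAS AND PROOFS =====

-- ===== VERDICT (by name: the statement is the Claim_ definition above) =====
lemma pvChk_eq_all (c : Char) (ls : List String) :
    pvChk c ls = ls.all (fun l => l.toList.contains c) := by
  induction ls with
  | nil => rfl
  | cons l ls ih => simp [pvChk, ih]

lemma fold_inter_eq_filter (t : List String) (s0 : List Char) :
    t.foldl (fun common line => PySem.Set.inter common (PySem.Set.ofList line.toList)) s0
      = s0.filter (fun c => t.all (fun l => l.toList.contains c)) := by
  induction t generalizing s0 with
  | nil => simp
  | cons l ls ih =>
    rw [List.foldl_cons, ih]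
    simp only [PySem.Set.inter, List.filter_filter]
    apply List.filter_congr
    intro c _
    simp
    exact Bool.and_comm _ _

theorem count_for_group2_spec : Claim_equal_count_for_group2 := by
  intro lines _
  unfold Spec_count_for_group2 count_for_group2
  rw [PySem.List.foldl_if_add_one]
  simp only [zero_add]
  cases lines with
  | nil => simp [count_for_group2_alt]
  | cons h t =>
    simp only [count_for_group2_alt]
    rw [fold_inter_eq_filter]
    rw [List.countP_eq_length_filter]
    congr 1
    have hperm : List.Perm
        ((PySem.Set.ofList ((List.map String.toList (h :: t)).flatten)).filter
            (fun c => pvChk c (h :: t)))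
        ((PySem.Set.ofList h.toList).filter
              (fun c => t.all (fun l => l.toList.contains c))) := by
      rw [List.perm_ext_iff_of_nodup
        ((PySem.Set.nodup_ofList _).filter _) ((PySem.Set.nodup_ofList _).filter _)]
      intro c
      simp [PySem.Set.mem_ofList, pvChk_eq_all]
      tauto
    exact hperm.length_eq
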